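-- pv_equiv track=rewrite | github.com/adam-poulton/afl-coaches-votes | src/util.py | generate_pairings
-- ===== SOURCE A (Python) =====
-- def generate_pairings(list1, list2, current_pairing, pairings):
--     # Base case: If list1 and list2 are empty, we found a valid pairing
--     if not list1 and not list2:
--         pairings.append(current_pairing)
--         return
--
--     # Recursive case
--     for i, v in enumerate(list1):
--         remaining1 = list1[:i] + list1[i + 1:]
--         remaining2 = list2[1:]
--         new_pairing = current_pairing + [(v, list2[0])]
--
--         generate_pairings(remaining1, remaining2, new_pairing, pairings)
--
--     return pairings
-- ===== SOURCE B (Python) =====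
-- def generate_pairings(list1, list2, current_pairing, pairings):
--     # Iterative DFS over an explicit stack of (remaining1, remaining2, pairing) frames.
--     stack = [(list1, list2, current_pairing)]
--     while stack:
--         l1, l2, cur = stack.pop()
--         if not l1 and not l2:
--             pairings.append(cur)
--         elif l1:
--             head = l2[0]
--             rest2 = l2[1:]
--             # push children in reverse index order so index 0 is explored first
--             for i in range(len(l1) - 1, -1, -1):
--                 stack.append((l1[:i] + l1[i + 1:], rest2, cur + [(l1[i], head)]))
--     return pairings
-- ===== Notes on version B (the rewrite author's own statement) =====
-- stated objective: alternative
-- what changed: Replaces the recursive backtracking with an iterative DFS over an explicit stack of (remaining1, remaining2, pairing) frames, pushing children in reverse index order to preserve the output order.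
-- outside the precondition, e.g. on generate_pairings([], [], [], []): A returns None, B returns [[]]
import Mathlib
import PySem

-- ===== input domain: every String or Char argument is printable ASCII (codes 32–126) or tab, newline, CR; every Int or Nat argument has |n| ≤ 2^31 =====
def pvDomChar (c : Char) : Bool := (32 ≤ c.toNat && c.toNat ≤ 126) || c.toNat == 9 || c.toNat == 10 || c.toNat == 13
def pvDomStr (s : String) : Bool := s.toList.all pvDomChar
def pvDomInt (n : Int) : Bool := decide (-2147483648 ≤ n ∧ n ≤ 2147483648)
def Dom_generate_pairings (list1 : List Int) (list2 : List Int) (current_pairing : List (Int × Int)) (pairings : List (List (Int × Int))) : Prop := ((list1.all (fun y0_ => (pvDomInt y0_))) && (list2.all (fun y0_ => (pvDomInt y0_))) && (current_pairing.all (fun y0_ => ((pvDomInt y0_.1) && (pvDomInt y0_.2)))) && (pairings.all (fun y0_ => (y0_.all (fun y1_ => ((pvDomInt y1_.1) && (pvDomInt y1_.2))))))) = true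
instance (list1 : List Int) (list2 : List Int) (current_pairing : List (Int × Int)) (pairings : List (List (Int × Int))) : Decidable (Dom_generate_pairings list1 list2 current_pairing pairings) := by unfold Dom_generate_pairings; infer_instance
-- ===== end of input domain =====

-- B replaces A's recursive backtracking by an iterative DFS over an explicit stack of frames
-- (same output values and order); equivalence is about the RETURN value only (both Pythons
-- also append the found pairings to the mutable `pairings` argument in the same order).


-- ===== PORT A =====
-- Literal port of A. `pairings` is threaded as the accumulator (Python mutates it in place);
-- `list2[0]` is ported as `list2.getD 0 0` — Python raises IndexError there when list2 = [],
-- and those inputs are excluded by Pre_ below.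
def generate_pairings (list1 : List Int) (list2 : List Int) (current_pairing : List (Int × Int)) (pairings : List (List (Int × Int))) : List (List (Int × Int)) :=
  if list1 = [] ∧ list2 = [] then
    pairings ++ [current_pairing]
  else
    (List.range list1.length).attach.foldl
      (fun acc i =>
        generate_pairings (list1.take i.1 ++ list1.drop (i.1 + 1)) (list2.drop 1)
          (current_pairing ++ [(list1.getD i.1 0, list2.getD 0 0)]) acc)
      pairings
termination_by list1.length
decreasing_by
  have hi := i.2
  simp only [List.mem_range] at hi
  simp only [List.length_append, List.length_take, List.length_drop]
  omega

-- ===== PORT B =====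
-- measure for the explicit-stack loop: a frame with n remaining elements is replaced by
-- n child frames of size n-1, and n·n! < (n+1)!.
def pvMeasure (stack : List (List Int × List Int × List (Int × Int))) : Nat :=
  (stack.map (fun f => Nat.factorial (f.1.length + 1))).sum

-- while stack: pop a frame; base case appends, otherwise push the children
-- (pushed in reverse / popped from the top = the ascending-index children in front).
def pvRun (pairings : List (List (Int × Int))) (stack : List (List Int × List Int × List (Int × Int))) : List (List (Int × Int)) :=
  match stack with
  | [] => pairings
  | (l1, l2, cur) :: rest =>
    if l1 = [] ∧ l2 = [] then
      pvRun (pairings ++ [cur]) rest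
    else if l1 = [] then
      pvRun pairings rest
    else
      pvRun pairings
        (((List.range l1.length).map
            (fun i => (l1.take i ++ l1.drop (i + 1), l2.drop 1, cur ++ [(l1.getD i 0, l2.getD 0 0)])))
          ++ rest)
termination_by pvMeasure stack
decreasing_by
  · simp [pvMeasure, Nat.factorial_pos]
  · simp [pvMeasure, Nat.factorial_pos]
  · simp only [pvMeasure, List.map_append, List.sum_append, List.map_map, List.map_cons, List.sum_cons]
    have h : ((List.range l1.length).map
        ((fun f => Nat.factorial (f.1.length + 1)) ∘
          (fun i => (l1.take i ++ l1.drop (i + 1), l2.drop 1, cur ++ [(l1.getD i 0, l2.getD 0 0)]))))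
        = (List.range l1.length).map (fun _ => Nat.factorial l1.length) := by
      apply List.map_congr_left
      intro i hi
      simp only [List.mem_range] at hi
      simp only [Function.comp, List.length_append, List.length_take, List.length_drop]
      congr 1
      omega
    rw [h]
    simp only [List.map_const', List.sum_replicate, List.length_range, smul_eq_mul]
    have : l1.length * Nat.factorial l1.length < Nat.factorial (l1.length + 1) := by
      rw [Nat.factorial_succ]
      have := Nat.factorial_pos l1.length
      nlinarith
    omega

def generate_pairings_alt (list1 : List Int) (list2 : List Int) (current_pairing : List (Int × Int)) (pairings : List (List (Int × Int))) : List (List (Int × Int)) :=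
  pvRun pairings [(list1, list2, current_pairing)]

-- ===== PRECONDITION & SPEC =====
-- Pre_ excludes (a) both lists empty, where Python A returns None (no list value to match;
-- B returns pairings + [current_pairing]), and (b) len(list1) > len(list2), where Python A
-- raises IndexError on list2[0].
def Pre_generate_pairings (list1 : List Int) (list2 : List Int) (current_pairing : List (Int × Int)) (pairings : List (List (Int × Int))) : Prop :=
  ¬ (list1 = [] ∧ list2 = []) ∧ list1.length ≤ list2.length
instance (list1 : List Int) (list2 : List Int) (current_pairing : List (Int × Int)) (pairings : List (List (Int × Int))) : Decidable (Pre_generate_pairings list1 list2 current_pairing pairings) := by unfold Pre_generate_pairings; infer_instance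
def pvWitness_generate_pairings : List Int × List Int × (List (Int × Int)) × (List (List (Int × Int))) := ([1, 2], [3, 4], [], [])

def Spec_generate_pairings (list1 : List Int) (list2 : List Int) (current_pairing : List (Int × Int)) (pairings : List (List (Int × Int))) (out : List (List (Int × Int))) : Prop := out = generate_pairings_alt list1 list2 current_pairing pairings
instance (list1 : List Int) (list2 : List Int) (current_pairing : List (Int × Int)) (pairings : List (List (Int × Int))) (out : List (List (Int × Int))) : Decidable (Spec_generate_pairings list1 list2 current_pairing pairings out) := by unfold Spec_generate_pairings; infer_instance

-- ===== CLAIM (what is proved, stated in full; the proofs are below) =====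
def Claim_equal_generate_pairings : Prop := ∀ (list1 : List Int) (list2 : List Int) (current_pairing : List (Int × Int)) (pairings : List (List (Int × Int))), Dom_generate_pairings list1 list2 current_pairing pairings → Pre_generate_pairings list1 list2 current_pairing pairings → Spec_generate_pairings list1 list2 current_pairing pairings (generate_pairings list1 list2 current_pairing pairings)

-- ===== LEMMAS AND PROOFS =====

-- the solution set of one frame, as a pure function (proof device only)
def pvSol (l1 : List Int) (l2 : List Int) (cur : List (Int × Int)) : List (List (Int × Int)) :=
  if l1 = [] ∧ l2 = [] then [cur]
  else
    (List.range l1.length).attach.flatMap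
      (fun i => pvSol (l1.take i.1 ++ l1.drop (i.1 + 1)) (l2.drop 1) (cur ++ [(l1.getD i.1 0, l2.getD 0 0)]))
termination_by l1.length
decreasing_by
  have hi := i.2
  simp only [List.mem_range] at hi
  simp only [List.length_append, List.length_take, List.length_drop]
  omega

theorem gp_eq_sol (l1 l2 : List Int) (cur : List (Int × Int)) (prs : List (List (Int × Int))) :
    generate_pairings l1 l2 cur prs = prs ++ pvSol l1 l2 cur := by
  rw [generate_pairings, pvSol]
  split
  · rfl
  · rw [PySem.List.foldl_congr_mem
        (g := fun acc i => acc ++ pvSol (l1.take i.1 ++ l1.drop (i.1 + 1)) (l2.drop 1)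
              (cur ++ [(l1.getD i.1 0, l2.getD 0 0)]))]
    · exact PySem.List.foldl_append_eq_flatMap _ _ _
    · intro acc i hi
      have hlt : i.1 < l1.length := by
        have := i.2; simpa [List.mem_range] using this
      exact gp_eq_sol _ _ _ _
termination_by l1.length
decreasing_by
  simp only [List.length_append, List.length_take, List.length_drop]
  omega

theorem run_eq_sol (stack : List (List Int × List Int × List (Int × Int))) (prs : List (List (Int × Int))) :
    pvRun prs stack = prs ++ stack.flatMap (fun f => pvSol f.1 f.2.1 f.2.2) := by
  induction prs, stack using pvRun.induct with
  | case1 prs => simp [pvRun]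
  | case2 prs l1 l2 cur rest h ih =>
    rw [pvRun]
    simp only [h, if_pos]
    rw [ih, List.flatMap_cons, pvSol]
    simp
  | case3 prs l2 cur rest h ih =>
    have h2 : l2 ≠ [] := by intro hl; exact h ⟨rfl, hl⟩
    rw [pvRun, if_neg h, if_pos rfl, ih, List.flatMap_cons, pvSol]
    simp [h2]
  | case4 prs l1 l2 cur rest h h2 ih =>
    rw [pvRun, if_neg h, if_neg h2, ih, List.flatMap_cons, List.flatMap_append, List.flatMap_map]
    rw [pvSol, if_neg h]
    simp [List.flatMap_subtype, List.unattach_attach]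

-- ===== VERDICT (by name: the statement is the Claim_ definition above) =====
theorem generate_pairings_spec : Claim_equal_generate_pairings := by
  intro l1 l2 cur prs _ _
  unfold Spec_generate_pairings generate_pairings_alt
  rw [gp_eq_sol, run_eq_sol]
  simp
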